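-- pv_equiv track=rewrite | github.com/salahfh/employee_rotation | src/employee_rotation/data.py | clean_up_output
-- ===== SOURCE A (Python) =====
-- def clean_up_output(lines):
--     """
--     Remove the extra white line and add one when necessary
--     """
--     prev_line = lines[0]
--     new_lines = [prev_line]
--     for line in lines[1:]:
--         if line == "\n" and prev_line == "\n":
--             continue
--         if not prev_line.startswith("  ") and line.startswith("  "):
--             new_lines.append("\n")
--         prev_line = line
--         new_lines.append(line)
--     return new_lines
-- ===== SOURCE B (Python) =====
-- def clean_up_output(lines):
--     # pass 1: drop each blank line that follows a kept blank line
--     collapsed = [lines[0]]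
--     for line in lines[1:]:
--         if not (line == "\n" and collapsed[-1] == "\n"):
--             collapsed.append(line)
--     # pass 2: insert a blank line before each indented block start
--     out = [collapsed[0]]
--     for prev, line in zip(collapsed, collapsed[1:]):
--         if line.startswith("  ") and not prev.startswith("  "):
--             out.append("\n")
--         out.append(line)
--     return out
-- ===== Notes on version B (the rewrite author's own statement) =====
-- stated objective: alternative
-- what changed: Replaces A's single stateful loop (prev_line threaded past skipped lines) by two independent passes: first collapse runs of blank lines, then zip the collapsed list with its tail to insert a blank before each indented block.
import Mathlib
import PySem

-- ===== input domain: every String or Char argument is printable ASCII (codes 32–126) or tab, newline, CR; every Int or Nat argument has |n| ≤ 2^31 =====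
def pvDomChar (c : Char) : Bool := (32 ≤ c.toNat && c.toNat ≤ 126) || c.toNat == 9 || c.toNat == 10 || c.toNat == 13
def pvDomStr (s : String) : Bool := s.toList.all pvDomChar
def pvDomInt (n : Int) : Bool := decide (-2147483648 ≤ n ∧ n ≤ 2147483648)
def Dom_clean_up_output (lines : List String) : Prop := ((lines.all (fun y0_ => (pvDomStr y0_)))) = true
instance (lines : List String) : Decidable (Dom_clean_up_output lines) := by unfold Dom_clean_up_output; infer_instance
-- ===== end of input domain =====

-- B replaces A's single stateful loop by two independent passes (collapse blank runs, then
-- zip-with-tail to insert blanks); equivalence of the RETURN value on nonempty input.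

-- ===== PORT A =====
-- A's loop state: (prev_line, new_lines); branches in A's order.
def clean_up_output (lines : List String) : List String :=
  match lines with
  | [] => []   -- A raises IndexError here; excluded by Pre_
  | first :: rest =>
    (rest.foldl (fun (st : String × List String) (line : String) =>
      if line = "\n" ∧ st.1 = "\n" then st
      else
        let acc := if ¬ PySem.Str.startswith st.1 "  " ∧ PySem.Str.startswith line "  "
                   then st.2 ++ ["\n"] else st.2
        (line, acc ++ [line])) (first, [first])).2

-- ===== PORT B =====
def clean_up_output_alt (lines : List String) : List String :=
  match lines with
  | [] => []   -- B raises IndexError here; excluded by Pre_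
  | first :: rest =>
    let collapsed := rest.foldl (fun c line =>
      if ¬ (line = "\n" ∧ PySem.List.pyGetD c (-1) "" = "\n") then c ++ [line] else c) [first]
    (collapsed.zip collapsed.tail).foldl (fun out (p : String × String) =>
      (if PySem.Str.startswith p.2 "  " ∧ ¬ PySem.Str.startswith p.1 "  "
       then out ++ ["\n"] else out) ++ [p.2]) [PySem.List.pyGetD collapsed 0 ""]

-- ===== PRECONDITION & SPEC =====
-- Pre_ excludes only the empty list, on which both A and B raise IndexError (lines[0]).
def Pre_clean_up_output (lines : List String) : Prop := lines ≠ []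
instance (lines : List String) : Decidable (Pre_clean_up_output lines) := by
  unfold Pre_clean_up_output; infer_instance
def pvWitness_clean_up_output : List String := ["a\n", "\n", "\n", "  b\n"]
def Spec_clean_up_output (lines : List String) (out : List String) : Prop := out = clean_up_output_alt lines
instance (lines : List String) (out : List String) : Decidable (Spec_clean_up_output lines out) := by unfold Spec_clean_up_output; infer_instance

-- ===== CLAIM (what is proved, stated in full; the proofs are below) =====
def Claim_equal_clean_up_output : Prop := ∀ (lines : List String), Dom_clean_up_output lines → Pre_clean_up_output lines → Spec_clean_up_output lines (clean_up_output lines)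

-- ===== LEMMAS AND PROOFS =====

-- Common reference: the collapsed suffix after a kept line `prev`.
def pvCollapse (prev : String) : List String → List String
  | [] => []
  | l :: rest =>
    if l = "\n" ∧ prev = "\n" then pvCollapse prev rest else l :: pvCollapse l rest

-- Common reference: pass-2 emission after a kept line `prev`.
def pvEmit (prev : String) : List String → List String
  | [] => []
  | l :: rest =>
    (if ¬ PySem.Str.startswith prev "  " ∧ PySem.Str.startswith l "  "
     then ["\n", l] else [l]) ++ pvEmit l rest

theorem pvA_fold (rest : List String) : ∀ (prev : String) (acc : List String),
    (rest.foldl (fun (st : String × List String) (line : String) =>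
      if line = "\n" ∧ st.1 = "\n" then st
      else
        let acc := if ¬ PySem.Str.startswith st.1 "  " ∧ PySem.Str.startswith line "  "
                   then st.2 ++ ["\n"] else st.2
        (line, acc ++ [line])) (prev, acc)).2 = acc ++ pvEmit prev (pvCollapse prev rest) := by
  induction rest with
  | nil => intro prev acc; simp [pvCollapse, pvEmit]
  | cons l rest ih =>
    intro prev acc
    rw [List.foldl_cons]
    simp only [pvCollapse]
    by_cases h : l = "\n" ∧ prev = "\n"
    · rw [if_pos h, if_pos h]
      exact ih prev acc
    · rw [if_neg h, if_neg h]
      simp only [pvEmit, ih]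
      by_cases hs : ¬ PySem.Str.startswith prev "  " ∧ PySem.Str.startswith l "  "
      · rw [if_pos hs, if_pos hs]; simp
      · rw [if_neg hs, if_neg hs]; simp

theorem pvB_pass1 (rest : List String) : ∀ (c : List String) (g : String),
    PySem.List.pyGetD c (-1) "" = g →
    rest.foldl (fun c line =>
      if ¬ (line = "\n" ∧ PySem.List.pyGetD c (-1) "" = "\n") then c ++ [line] else c) c
      = c ++ pvCollapse g rest := by
  induction rest with
  | nil => intro c g _; simp [pvCollapse]
  | cons l rest ih =>
    intro c g hg
    rw [List.foldl_cons]
    simp only [pvCollapse]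
    by_cases h : l = "\n" ∧ g = "\n"
    · rw [if_neg (not_not_intro ⟨h.1, hg.trans h.2⟩), if_pos h]
      exact ih c g hg
    · rw [if_pos (fun hc => h ⟨hc.1, hg.symm.trans hc.2⟩), if_neg h,
        ih (c ++ [l]) l (PySem.List.pyGetD_neg_one_append_singleton c l "")]
      simp

theorem pvB_pass2 (t : List String) : ∀ (prev : String) (out : List String),
    (((prev :: t).zip t).foldl (fun out (p : String × String) =>
      (if PySem.Str.startswith p.2 "  " ∧ ¬ PySem.Str.startswith p.1 "  "
       then out ++ ["\n"] else out) ++ [p.2]) out) = out ++ pvEmit prev t := by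
  induction t with
  | nil => intro prev out; simp [pvEmit]
  | cons y t ih =>
    intro prev out
    rw [List.zip_cons_cons, List.foldl_cons]
    simp only [pvEmit]
    by_cases hs : ¬ PySem.Str.startswith prev "  " ∧ PySem.Str.startswith y "  "
    · rw [if_pos ⟨hs.2, hs.1⟩, if_pos hs, ih]; simp
    · rw [if_neg (fun hc => hs ⟨hc.2, hc.1⟩), if_neg hs, ih]; simp

-- ===== VERDICT (by name: the statement is the Claim_ definition above) =====
theorem clean_up_output_spec : Claim_equal_clean_up_output := by
  intro lines _ hpre
  unfold Spec_clean_up_output clean_up_output clean_up_output_alt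
  match lines with
  | [] => exact absurd rfl hpre
  | first :: rest =>
    simp only
    rw [pvA_fold, pvB_pass1 rest [first] first
        (PySem.List.pyGetD_neg_one_append_singleton [] first "")]
    simp only [List.singleton_append, List.tail_cons, PySem.List.pyGetD_zero_cons]
    rw [pvB_pass2]
    simp
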